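-- pv_equiv track=rewrite | github.com/jquiaot/glowing-winner-leetcode | leetcode/2073__time_needed_to_buy_tickets.py | timeRequiredToBuy1
-- ===== SOURCE A (Python) =====
-- def timeRequiredToBuy1(tickets: list[int], k: int) -> int:
--     """
--     (Naive) solution - simulate the ticket buying process
--
--     Time:
--     - let n = len(tickets)
--     - => O(n * k) for the at most k times to run through the list of tickets
--
--     Space:
--     - => O(1) to maintain accumulated time
--     """
--     t = 0
--     while True:
--         for i in range(len(tickets)):
--             if tickets[i] > 0:
--                 tickets[i] -= 1
--                 t += 1
--             if i == k and tickets[k] == 0: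
--                 break
--         if tickets[k] == 0:
--             break
--     return t
-- ===== SOURCE B (Python) =====
-- def timeRequiredToBuy1(tickets: list[int], k: int) -> int:
--     # Closed form, one pass: before person k finishes, person i buys
--     # min(tickets[i], need) tickets if i <= k, min(tickets[i], need - 1) if i > k,
--     # clamped at 0 (nobody buys a negative number of tickets), where need = tickets[k].
--     # (Does not mutate the input, unlike A.)
--     need = tickets[k]
--     if need <= 0:
--         return 0
--     return (sum(max(0, min(t, need)) for t in tickets[:k + 1])
--             + sum(max(0, min(t, need - 1)) for t in tickets[k + 1:]))
-- ===== Notes on version B (the rewrite author's own statement) =====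
-- stated objective: faster
-- what changed: replaces the pass-by-pass queue simulation with a one-pass closed form: person i contributes max(0, min(tickets[i], tickets[k])) if i <= k and max(0, min(tickets[i], tickets[k]-1)) if i > k
-- intended difference: when tickets[k] == 0 but some earlier entry is positive, A returns the number of positive entries before k (it sells one ticket to each of them before noticing k needs none) while B returns 0, the intended time for a person who needs no tickets — e.g. on timeRequiredToBuy1([1, 0], 1): A returns 1, B returns 0
-- outside the precondition, e.g. on timeRequiredToBuy1([1, 1], -1): A returns 2, B returns 0
import Mathlib
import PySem

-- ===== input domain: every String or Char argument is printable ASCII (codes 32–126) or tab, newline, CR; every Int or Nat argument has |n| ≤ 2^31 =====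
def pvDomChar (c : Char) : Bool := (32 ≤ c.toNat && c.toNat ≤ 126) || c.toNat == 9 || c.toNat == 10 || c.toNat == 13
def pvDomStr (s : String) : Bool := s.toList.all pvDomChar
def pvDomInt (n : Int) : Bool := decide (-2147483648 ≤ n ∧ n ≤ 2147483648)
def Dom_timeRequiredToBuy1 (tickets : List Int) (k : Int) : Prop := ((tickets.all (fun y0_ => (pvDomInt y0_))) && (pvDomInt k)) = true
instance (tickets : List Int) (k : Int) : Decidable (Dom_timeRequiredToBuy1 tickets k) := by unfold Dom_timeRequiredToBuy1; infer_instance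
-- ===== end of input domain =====

-- B replaces A's pass-by-pass queue simulation by a one-pass closed form over the list.
-- NOTE: the Python A mutates `tickets` in place (decrements entries); the equivalence proved
-- here is about the RETURN value only — B does not mutate its argument.

-- ===== PORT A =====
-- inner `for i in range(n)` loop with its `break`: i is the current index, rem = n - i
def pvA_inner (k : Int) : Nat → Nat → List Int → Int → List Int × Int
  | _, 0, tickets, t => (tickets, t)
  | i, rem + 1, tickets, t =>
    let x := PySem.List.pyGetD tickets (i : Int) 0          -- tickets[i] (i always in range here)
    let tickets' := if 0 < x then PySem.List.pySetD tickets (i : Int) (x - 1) else tickets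
    let t' := if 0 < x then t + 1 else t
    if (i : Int) = k ∧ PySem.List.pyGetD tickets' k 0 = 0 then (tickets', t')   -- break
    else pvA_inner k (i + 1) rem tickets' t'

-- outer `while True` loop, with fuel tickets[k]+1 (enough whenever tickets[k] ≥ 0; A diverges otherwise)
def pvA_outer (k : Int) : Nat → List Int → Int → Int
  | 0, _, t => t
  | fuel + 1, tickets, t =>
    let r := pvA_inner k 0 tickets.length tickets t
    if PySem.List.pyGetD r.1 k 0 = 0 then r.2
    else pvA_outer k fuel r.1 r.2

def timeRequiredToBuy1 (tickets : List Int) (k : Int) : Int :=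
  pvA_outer k ((PySem.List.pyGetD tickets k 0).toNat + 1) tickets 0

-- ===== PORT B =====
-- sum(max(0, min(t, c)) for t in xs)
def pvSumMin (xs : List Int) (c : Int) : Int :=
  xs.foldl (fun a t => a + max 0 (min t c)) 0

def timeRequiredToBuy1_alt (tickets : List Int) (k : Int) : Int :=
  let need := PySem.List.pyGetD tickets k 0
  if need ≤ 0 then 0
  else
    pvSumMin (PySem.List.slice tickets none (some (k + 1))) need +
    pvSumMin (PySem.List.slice tickets (some (k + 1)) none) (need - 1)

-- ===== PRECONDITION & SPEC =====
-- Pre_ restricts to the problem's natural domain: 0 ≤ k < len(tickets) — the buyer's position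
-- (A raises IndexError for k outside [-n, n), and a negative position is outside the task's
-- domain) — and tickets[k] ≥ 0 (A never terminates when tickets[k] < 0).
def Pre_timeRequiredToBuy1 (tickets : List Int) (k : Int) : Prop :=
  0 ≤ k ∧ k < tickets.length ∧ 0 ≤ PySem.List.pyGetD tickets k 0
instance (tickets : List Int) (k : Int) : Decidable (Pre_timeRequiredToBuy1 tickets k) := by
  unfold Pre_timeRequiredToBuy1; infer_instance

def pvWitness_timeRequiredToBuy1 : List Int × Int := ([2, 3, 2], 2)

-- When tickets[k] == 0 but some earlier entry is positive, A returns the number of positive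
-- entries before k (it sells one ticket to each of them before noticing k needs none) while B
-- returns 0, the intended time for a person who needs no tickets.
def D_timeRequiredToBuy1 (tickets : List Int) (k : Int) : Prop :=
  0 ≤ k ∧ k < tickets.length ∧ tickets.getD k.toNat 0 = 0 ∧ ∃ x ∈ tickets.take k.toNat, 0 < x
instance (tickets : List Int) (k : Int) : Decidable (D_timeRequiredToBuy1 tickets k) := by
  unfold D_timeRequiredToBuy1; infer_instance

def Spec_timeRequiredToBuy1 (tickets : List Int) (k : Int) (out : Int) : Prop :=
  ¬ D_timeRequiredToBuy1 tickets k → out = timeRequiredToBuy1_alt tickets k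
instance (tickets : List Int) (k : Int) (out : Int) : Decidable (Spec_timeRequiredToBuy1 tickets k out) := by
  unfold Spec_timeRequiredToBuy1; infer_instance

def pvDiffWitness_timeRequiredToBuy1 : List Int × Int := ([1, 0], 1)
def pvDiffWitnessOut_timeRequiredToBuy1 : Int × Int := (1, 0)

-- ===== CLAIM (what is proved, stated in full; the proofs are below) =====
def Claim_unchanged_timeRequiredToBuy1 : Prop := ∀ (tickets : List Int) (k : Int), Dom_timeRequiredToBuy1 tickets k → Pre_timeRequiredToBuy1 tickets k → Spec_timeRequiredToBuy1 tickets k (timeRequiredToBuy1 tickets k)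
def Claim_changed_timeRequiredToBuy1 : Prop := Dom_timeRequiredToBuy1 (pvDiffWitness_timeRequiredToBuy1.1) (pvDiffWitness_timeRequiredToBuy1.2) ∧ Pre_timeRequiredToBuy1 (pvDiffWitness_timeRequiredToBuy1.1) (pvDiffWitness_timeRequiredToBuy1.2) ∧ D_timeRequiredToBuy1 (pvDiffWitness_timeRequiredToBuy1.1) (pvDiffWitness_timeRequiredToBuy1.2) ∧ timeRequiredToBuy1 (pvDiffWitness_timeRequiredToBuy1.1) (pvDiffWitness_timeRequiredToBuy1.2) = pvDiffWitnessOut_timeRequiredToBuy1.1 ∧ timeRequiredToBuy1_alt (pvDiffWitness_timeRequiredToBuy1.1) (pvDiffWitness_timeRequiredToBuy1.2) = pvDiffWitnessOut_timeRequiredToBuy1.2 ∧ pvDiffWitnessOut_timeRequiredToBuy1.1 ≠ pvDiffWitnessOut_timeRequiredToBuy1.2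
def Claim_exact_timeRequiredToBuy1 : Prop := ∀ (tickets : List Int) (k : Int), Dom_timeRequiredToBuy1 tickets k → Pre_timeRequiredToBuy1 tickets k → D_timeRequiredToBuy1 tickets k → timeRequiredToBuy1 tickets k ≠ timeRequiredToBuy1_alt tickets k

-- ===== LEMMAS AND PROOFS =====
def pvDec1 (x : Int) : Int := if 0 < x then x - 1 else x

theorem pv_step (k : Int) (pre rs : List Int) (x t : Int) :
    pvA_inner k pre.length (rs.length + 1) (pre ++ x :: rs) t =
      if (pre.length : Int) = k ∧ PySem.List.pyGetD (pre ++ pvDec1 x :: rs) k 0 = 0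
      then (pre ++ pvDec1 x :: rs, if 0 < x then t + 1 else t)
      else pvA_inner k (pre.length + 1) rs.length (pre ++ pvDec1 x :: rs) (if 0 < x then t + 1 else t) := by
  rw [pvA_inner]
  have hget : PySem.List.pyGetD (pre ++ x :: rs) (pre.length : Int) 0 = x := by
    simp [List.getD]
  have hset : PySem.List.pySetD (pre ++ x :: rs) (pre.length : Int) (x - 1) = pre ++ (x - 1) :: rs := by
    simp
  simp only [hget, hset, pvDec1]
  split_ifs with h1 <;> simp

theorem pv_inner_full (k : Int) : ∀ (rest pre : List Int) (t : Int),
    (k < (pre.length : Int) ∨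
      ∃ j, ∃ _ : j < rest.length, k = (pre.length : Int) + j ∧ 2 ≤ rest.getD j 0) →
    pvA_inner k pre.length rest.length (pre ++ rest) t
      = (pre ++ rest.map pvDec1, t + (rest.countP (fun x => decide (0 < x)) : Int)) := by
  intro rest
  induction rest with
  | nil => intro pre t h; simp [pvA_inner]
  | cons x rs ih =>
    intro pre t h
    rw [show (x :: rs).length = rs.length + 1 from rfl, pv_step]
    have hnb : ¬ ((pre.length : Int) = k ∧ PySem.List.pyGetD (pre ++ pvDec1 x :: rs) k 0 = 0) := by
      rcases h with h | ⟨j, hj, hk, hx2⟩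
      · rintro ⟨rfl, -⟩; omega
      · rcases Nat.eq_zero_or_pos j with rfl | hjpos
        · simp only [List.getD_cons_zero] at hx2
          rintro ⟨-, hz⟩
          rw [hk] at hz
          push_cast at hz
          have : PySem.List.pyGetD (pre ++ pvDec1 x :: rs) ((pre.length : Int) + 0) 0 = pvDec1 x := by
            simp [List.getD]
          rw [this] at hz
          simp [pvDec1] at hz
          omega
        · rintro ⟨he, -⟩; omega
    rw [if_neg hnb]
    have h2 : (k < ((pre ++ [pvDec1 x]).length : Int) ∨
        ∃ j, ∃ _ : j < rs.length, k = ((pre ++ [pvDec1 x]).length : Int) + j ∧ 2 ≤ rs.getD j 0) := by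
      rcases h with h | ⟨j, hj, hk, hx2⟩
      · left; simp; omega
      · rcases Nat.eq_zero_or_pos j with rfl | hjpos
        · left; simp; omega
        · right
          refine ⟨j - 1, by simp at hj ⊢; omega, ?_, ?_⟩
          · simp; omega
          · rcases j with _ | j'
            · omega
            · simpa using hx2
    rw [show pre ++ pvDec1 x :: rs = (pre ++ [pvDec1 x]) ++ rs by simp]
    have := ih (pre ++ [pvDec1 x]) (if 0 < x then t + 1 else t) h2
    simp only [List.length_append, List.length_singleton] at this
    rw [this, Prod.mk.injEq]
    constructor
    · simp
    · simp [List.countP_cons, pvDec1]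
      split_ifs <;> push_cast <;> ring

theorem pv_inner_break (k : Int) : ∀ (rest : List Int) (j : Nat) (pre : List Int) (t : Int),
    j < rest.length → k = (pre.length : Int) + j →
    0 ≤ rest.getD j 0 → rest.getD j 0 ≤ 1 →
    pvA_inner k pre.length rest.length (pre ++ rest) t
      = (pre ++ (rest.take (j+1)).map pvDec1 ++ rest.drop (j+1),
         t + ((rest.take (j+1)).countP (fun x => decide (0 < x)) : Int)) := by
  intro rest
  induction rest with
  | nil => intro j pre t hj; simp at hj
  | cons x rs ih =>
    intro j pre t hj hk h0 h1
    rw [show (x :: rs).length = rs.length + 1 from rfl, pv_step]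
    rcases Nat.eq_zero_or_pos j with rfl | hjpos
    · simp only [List.getD_cons_zero] at h0 h1
      have hd : pvDec1 x = 0 := by simp [pvDec1]; omega
      have hcond : (pre.length : Int) = k ∧ PySem.List.pyGetD (pre ++ pvDec1 x :: rs) k 0 = 0 := by
        constructor
        · omega
        · have hkk : k = (pre.length : Int) := by omega
          subst hkk
          simp [List.getD, hd]
      rw [if_pos hcond]
      simp [List.countP_cons, pvDec1]
      split_ifs <;> simp
    · obtain ⟨j', rfl⟩ : ∃ j', j = j' + 1 := ⟨j - 1, by omega⟩
      have hnb : ¬ ((pre.length : Int) = k ∧ PySem.List.pyGetD (pre ++ pvDec1 x :: rs) k 0 = 0) := by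
        rintro ⟨he, -⟩; omega
      rw [if_neg hnb]
      rw [show pre ++ pvDec1 x :: rs = (pre ++ [pvDec1 x]) ++ rs by simp]
      have := ih j' (pre ++ [pvDec1 x]) (if 0 < x then t + 1 else t)
        (by simpa using hj) (by simp; push_cast; omega)
        (by simpa using h0) (by simpa using h1)
      simp only [List.length_append, List.length_singleton] at this
      rw [this, Prod.mk.injEq]
      constructor
      · simp
      · simp [List.countP_cons]
        split_ifs <;> push_cast <;> ring

theorem pvSumMin_eq_sum (xs : List Int) (c : Int) :
    pvSumMin xs c = (xs.map (fun t => max 0 (min t c))).sum := by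
  unfold pvSumMin; rw [PySem.List.foldl_add]; simp

theorem pvSumMin_cons (x : Int) (xs : List Int) (c : Int) :
    pvSumMin (x :: xs) c = max 0 (min x c) + pvSumMin xs c := by
  simp [pvSumMin_eq_sum]

theorem pvSumMin_one (xs : List Int) :
    pvSumMin xs 1 = (xs.countP (fun x => decide (0 < x)) : Int) := by
  induction xs with
  | nil => simp [pvSumMin]
  | cons x xs ih =>
    rw [pvSumMin_cons, ih]
    simp [List.countP_cons]
    split_ifs <;> push_cast <;> omega

theorem pvSumMin_zero (xs : List Int) :
    pvSumMin xs 0 = 0 := by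
  induction xs with
  | nil => simp [pvSumMin]
  | cons x xs ih =>
    rw [pvSumMin_cons, ih]
    omega

theorem pvSumMin_dec (xs : List Int) (c : Int) (hc : 1 ≤ c) :
    pvSumMin xs c = (xs.countP (fun x => decide (0 < x)) : Int) + pvSumMin (xs.map pvDec1) (c - 1) := by
  induction xs with
  | nil => simp [pvSumMin]
  | cons x xs ih =>
    rw [pvSumMin_cons, ih, List.map_cons, pvSumMin_cons]
    simp [List.countP_cons, pvDec1]
    split_ifs <;> push_cast <;> omega

theorem pvA_outer_eq : ∀ (m : Nat) (tickets : List Int) (kk : Nat) (t : Int),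
    kk < tickets.length → tickets.getD kk 0 = (m : Int) + 1 →
    pvA_outer (kk : Int) (m + 2) tickets t
      = t + pvSumMin (tickets.take (kk + 1)) ((m : Int) + 1) + pvSumMin (tickets.drop (kk + 1)) (m : Int) := by
  intro m
  induction m with
  | zero =>
    intro tickets kk t hk hv
    simp only [Nat.cast_zero, zero_add] at hv ⊢
    rw [pvA_outer]
    have hbrk := pv_inner_break (kk : Int) tickets kk [] t (by omega) (by simp) (by omega) (by omega)
    simp only [List.nil_append, List.length_nil] at hbrk
    rw [hbrk]
    have hget : PySem.List.pyGetD ((tickets.take (kk+1)).map pvDec1 ++ tickets.drop (kk+1)) (kk : Int) 0 = 0 := by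
      have hlen : ((tickets.take (kk+1)).map pvDec1).length = kk + 1 := by simp; omega
      simp only [PySem.List.pyGetD_natCast]
      rw [List.getD_eq_getElem?_getD, List.getElem?_append_left (by omega),
          List.getElem?_map, List.getElem?_take_of_lt (by omega)]
      have hsome : tickets[kk]? = some (tickets.getD kk 0) := by
        rw [List.getD_eq_getElem?_getD, List.getElem?_eq_getElem hk]; simp
      rw [hsome]
      simp only [Option.map_some, Option.getD_some, pvDec1, hv]
      norm_num
    rw [if_pos hget]
    rw [pvSumMin_one, pvSumMin_zero]
    ring
  | succ m ih =>
    intro tickets kk t hk hv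
    push_cast at hv
    have e1 : (((m+1 : Nat)) : Int) + 1 = (m : Int) + 2 := by push_cast; ring
    have e2 : (((m+1 : Nat)) : Int) = (m : Int) + 1 := by push_cast; ring
    rw [e1, e2, pvA_outer]
    have hfull := pv_inner_full (kk : Int) tickets [] t
      (Or.inr ⟨kk, by omega, by simp, by omega⟩)
    simp only [List.nil_append, List.length_nil] at hfull
    rw [hfull]
    have hvk : tickets[kk] = (m : Int) + 2 := by
      rw [List.getD_eq_getElem?_getD, List.getElem?_eq_getElem hk] at hv
      simp at hv; omega
    have hd : pvDec1 ((m : Int) + 2) = (m : Int) + 1 := by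
      unfold pvDec1; rw [if_pos (by omega : (0:Int) < (m:Int)+2)]; ring
    have hget : PySem.List.pyGetD (tickets.map pvDec1) (kk : Int) 0 = (m : Int) + 1 := by
      simp only [PySem.List.pyGetD_natCast]
      rw [List.getD_eq_getElem?_getD, List.getElem?_map, List.getElem?_eq_getElem hk, hvk]
      simp [hd]
    rw [if_neg (by rw [hget]; intro hc; omega)]
    have := ih (tickets.map pvDec1) kk (t + (tickets.countP (fun x => decide (0 < x)) : Int))
      (by simpa using hk)
      (by rw [List.getD_eq_getElem?_getD, List.getElem?_map, List.getElem?_eq_getElem hk, hvk]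
          simp [hd])
    rw [this]
    rw [pvSumMin_dec (tickets.take (kk+1)) ((m:Int)+2) (by omega),
        pvSumMin_dec (tickets.drop (kk+1)) ((m:Int)+1) (by omega)]
    have hsplit : (tickets.countP (fun x => decide (0 < x)) : Int)
        = ((tickets.take (kk+1)).countP (fun x => decide (0 < x)) : Int)
          + ((tickets.drop (kk+1)).countP (fun x => decide (0 < x)) : Int) := by
      rw [← Nat.cast_add, ← List.countP_append, List.take_append_drop]
    rw [hsplit, List.map_take, List.map_drop]
    norm_num
    ring

theorem pv_main (tickets : List Int) (k : Int)
    (hk0 : 0 ≤ k) (hklen : k < tickets.length) (hvk0 : 0 ≤ PySem.List.pyGetD tickets k 0)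
    (hnd : ¬ (tickets.getD k.toNat 0 = 0 ∧ ∃ x ∈ tickets.take k.toNat, 0 < x)) :
    timeRequiredToBuy1 tickets k = timeRequiredToBuy1_alt tickets k := by
  obtain ⟨kk, rfl⟩ : ∃ kk : Nat, k = (kk : Int) := ⟨k.toNat, (Int.toNat_of_nonneg hk0).symm⟩
  have hkk : kk < tickets.length := by omega
  have hvnn : 0 ≤ tickets.getD kk 0 := by simpa using hvk0
  simp only [Int.toNat_natCast] at hnd
  unfold timeRequiredToBuy1 timeRequiredToBuy1_alt
  simp only [PySem.List.pyGetD_natCast]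
  rcases eq_or_lt_of_le hvnn with hv0 | hvpos
  · -- tickets[k] == 0 and (¬ D_:) no positive entry before k, so both sides are 0
    rw [if_pos (by omega)]
    have hz : tickets.getD kk 0 = 0 := hv0.symm
    rw [hz]
    show pvA_outer (kk : Int) 1 tickets 0 = 0
    rw [pvA_outer]
    have hbrk := pv_inner_break (kk : Int) tickets kk [] 0 (by omega) (by simp) (by omega) (by omega)
    simp only [List.nil_append, List.length_nil] at hbrk
    rw [hbrk]
    have hcount : ((tickets.take (kk+1)).countP (fun x => decide (0 < x)) : Int) = 0 := by
      have : tickets.take (kk+1) = tickets.take kk ++ tickets[kk]?.toList := List.take_succ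
      rw [this, List.countP_append]
      have h1 : (tickets.take kk).countP (fun x => decide (0 < x)) = 0 := by
        rw [List.countP_eq_zero]
        intro x hx
        simp only [decide_eq_true_eq]
        intro hpos
        exact hnd ⟨hz, x, hx, hpos⟩
      have h2 : tickets[kk]?.toList.countP (fun x => decide (0 < x)) = 0 := by
        rw [List.getElem?_eq_getElem hkk]
        have : tickets[kk] = 0 := by
          rw [List.getD_eq_getElem?_getD, List.getElem?_eq_getElem hkk] at hz
          simpa using hz
        simp [this]
      simp [h1, h2]
    have hget : PySem.List.pyGetD ((tickets.take (kk+1)).map pvDec1 ++ tickets.drop (kk+1)) (kk : Int) 0 = 0 := by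
      have hlen : ((tickets.take (kk+1)).map pvDec1).length = kk + 1 := by simp; omega
      simp only [PySem.List.pyGetD_natCast]
      rw [List.getD_eq_getElem?_getD, List.getElem?_append_left (by omega),
          List.getElem?_map, List.getElem?_take_of_lt (by omega)]
      have hsome : tickets[kk]? = some (tickets.getD kk 0) := by
        rw [List.getD_eq_getElem?_getD, List.getElem?_eq_getElem hkk]; simp
      rw [hsome]
      simp only [Option.map_some, Option.getD_some, pvDec1, hz]
      norm_num
    rw [if_pos hget]
    simpa using hcount
  · -- tickets[k] ≥ 1: both sides are the closed form
    rw [if_neg (by omega)]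
    obtain ⟨m, hm⟩ : ∃ m : Nat, tickets.getD kk 0 = (m : Int) + 1 :=
      ⟨(tickets.getD kk 0 - 1).toNat, by omega⟩
    rw [hm, show ((m : Int) + 1).toNat + 1 = m + 2 by omega]
    rw [pvA_outer_eq m tickets kk 0 hkk hm]
    have hslice1 : PySem.List.slice tickets none (some ((kk : Int) + 1)) = tickets.take (kk + 1) := by
      rw [show ((kk : Int) + 1) = ((kk + 1 : Nat) : Int) by push_cast; ring, PySem.List.slice_to_natCast]
    have hslice2 : PySem.List.slice tickets (some ((kk : Int) + 1)) none = tickets.drop (kk + 1) := by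
      rw [show ((kk : Int) + 1) = ((kk + 1 : Nat) : Int) by push_cast; ring, PySem.List.slice_from_natCast]
    rw [hslice1, hslice2]
    ring_nf

theorem pv_tight (tickets : List Int) (k : Int)
    (hk0 : 0 ≤ k) (hklen : k < tickets.length)
    (hz : tickets.getD k.toNat 0 = 0) (hpos : ∃ x ∈ tickets.take k.toNat, 0 < x) :
    timeRequiredToBuy1 tickets k ≠ timeRequiredToBuy1_alt tickets k := by
  obtain ⟨kk, rfl⟩ : ∃ kk : Nat, k = (kk : Int) := ⟨k.toNat, (Int.toNat_of_nonneg hk0).symm⟩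
  have hkk : kk < tickets.length := by omega
  simp only [Int.toNat_natCast] at hz hpos
  unfold timeRequiredToBuy1 timeRequiredToBuy1_alt
  simp only [PySem.List.pyGetD_natCast]
  rw [hz, if_pos (by omega)]
  show pvA_outer (kk : Int) 1 tickets 0 ≠ 0
  rw [pvA_outer]
  have hbrk := pv_inner_break (kk : Int) tickets kk [] 0 (by omega) (by simp) (by omega) (by omega)
  simp only [List.nil_append, List.length_nil] at hbrk
  rw [hbrk]
  have hget : PySem.List.pyGetD ((tickets.take (kk+1)).map pvDec1 ++ tickets.drop (kk+1)) (kk : Int) 0 = 0 := by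
    have hlen : ((tickets.take (kk+1)).map pvDec1).length = kk + 1 := by simp; omega
    simp only [PySem.List.pyGetD_natCast]
    rw [List.getD_eq_getElem?_getD, List.getElem?_append_left (by omega),
        List.getElem?_map, List.getElem?_take_of_lt (by omega)]
    have hsome : tickets[kk]? = some (tickets.getD kk 0) := by
      rw [List.getD_eq_getElem?_getD, List.getElem?_eq_getElem hkk]; simp
    rw [hsome]
    simp only [Option.map_some, Option.getD_some, pvDec1, hz]
    norm_num
  rw [if_pos hget]
  have hcp : 0 < (tickets.take (kk+1)).countP (fun x => decide (0 < x)) := by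
    rw [List.take_succ, List.countP_append]
    have : 0 < (tickets.take kk).countP (fun x => decide (0 < x)) := by
      rw [List.countP_pos_iff]
      obtain ⟨x, hx, hxpos⟩ := hpos
      exact ⟨x, hx, by simpa using hxpos⟩
    omega
  simp only []
  intro hcontra
  omega

-- ===== VERDICT (by name: the statement is the Claim_ definition above) =====
theorem timeRequiredToBuy1_spec : Claim_unchanged_timeRequiredToBuy1 := by
  intro tickets k _hdom hpre hnd
  obtain ⟨hk0, hklen, hvk0⟩ := hpre
  exact pv_main tickets k hk0 hklen hvk0 (fun h => hnd ⟨hk0, hklen, h.1, h.2⟩)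
theorem timeRequiredToBuy1_changed : Claim_changed_timeRequiredToBuy1 := by
  unfold Claim_changed_timeRequiredToBuy1; decide
theorem timeRequiredToBuy1_tight : Claim_exact_timeRequiredToBuy1 := by
  intro tickets k _hdom hpre hd
  obtain ⟨hk0, hklen, _⟩ := hpre
  exact pv_tight tickets k hk0 hklen hd.2.2.1 hd.2.2.2
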